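-- pv_equiv track=rewrite | github.com/Huangxianfeng001/Transformer_practice_tanstation | Transformer_components/Data_process.py | word2id
-- ===== SOURCE A (Python) =====
-- def word2id(en, cn, en_dict, cn_dict, sort=True):
--     """
--     将英文、中文单词列表转为单词索引列表
--     `sort=True`表示以英文语句长度排序，以便按批次填充时，同批次语句填充尽量少
--     """
--     length = len(en)
--     # 单词映射为索引
--     out_en_ids = [[en_dict.get(word, 1) for word in sent] for sent in en]
--     out_cn_ids = [[cn_dict.get(word, 1) for word in sent] for sent in cn]
--
--     # 按照语句长度排序
--     def len_argsort(seq):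
--         """
--         传入一系列语句数据(分好词的列表形式)，
--         按照语句长度排序后，返回排序后原来各语句在数据中的索引下标
--         """
--         return sorted(range(len(seq)), key=lambda x: len(seq[x]))
--
--     # 按相同顺序对中文、英文样本排序
--     if sort:
--         # 以英文语句长度排序
--         sorted_index = len_argsort(out_en_ids)
--         out_en_ids = [out_en_ids[idx] for idx in sorted_index]
--         out_cn_ids = [out_cn_ids[idx] for idx in sorted_index]
--     return out_en_ids, out_cn_ids
-- ===== SOURCE B (Python) =====
-- def word2id(en, cn, en_dict, cn_dict, sort=True):
--     out_en_ids = [[en_dict.get(word, 1) for word in sent] for sent in en]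
--     out_cn_ids = [[cn_dict.get(word, 1) for word in sent] for sent in cn]
--     if sort:
--         # counting/bucket sort by English sentence length (stable, no comparison sort)
--         m = max(map(len, out_en_ids), default=-1)
--         buckets = [[] for _ in range(m + 1)]
--         for pair in zip(out_en_ids, out_cn_ids):
--             buckets[len(pair[0])].append(pair)
--         out_en_ids = [e for b in buckets for e, _ in b]
--         out_cn_ids = [c for b in buckets for _, c in b]
--     return out_en_ids, out_cn_ids
-- ===== Notes on version B (the rewrite author's own statement) =====
-- stated objective: alternative
-- what changed: Replaces A's comparison sort over argsorted indices (plus reindexing both lists) with a stable counting/bucket sort: pairs (en_ids, cn_ids) are dropped into buckets indexed by English sentence length and the buckets are concatenated in length order.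
import Mathlib
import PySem

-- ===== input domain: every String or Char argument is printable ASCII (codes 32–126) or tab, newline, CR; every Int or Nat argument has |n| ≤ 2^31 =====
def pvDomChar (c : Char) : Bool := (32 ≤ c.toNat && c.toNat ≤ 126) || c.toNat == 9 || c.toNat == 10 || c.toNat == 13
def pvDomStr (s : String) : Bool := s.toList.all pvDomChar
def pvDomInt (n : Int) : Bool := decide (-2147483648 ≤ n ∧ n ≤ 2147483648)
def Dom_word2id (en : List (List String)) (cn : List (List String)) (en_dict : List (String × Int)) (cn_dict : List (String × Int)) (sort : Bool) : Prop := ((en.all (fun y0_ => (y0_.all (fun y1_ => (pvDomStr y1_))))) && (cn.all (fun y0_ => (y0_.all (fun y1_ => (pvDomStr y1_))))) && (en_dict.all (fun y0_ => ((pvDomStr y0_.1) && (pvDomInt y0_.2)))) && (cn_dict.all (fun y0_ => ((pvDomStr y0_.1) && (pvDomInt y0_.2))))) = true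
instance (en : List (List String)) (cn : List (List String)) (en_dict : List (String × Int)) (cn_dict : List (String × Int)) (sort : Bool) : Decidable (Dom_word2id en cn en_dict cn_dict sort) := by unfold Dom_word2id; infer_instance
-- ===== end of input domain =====

-- B replaces A's comparison sort over argsorted indices by a stable counting/bucket sort
-- keyed on English sentence length (objective: alternative; return value only).

-- dict.get(word, 1) on an association list: first match, default 1
def pvGet1 (d : List (String × Int)) (w : String) : Int := (List.lookup w d).getD 1

-- ===== PORT A =====
def word2id (en : List (List String)) (cn : List (List String)) (en_dict : List (String × Int)) (cn_dict : List (String × Int)) (sort : Bool) : List (List Int) × List (List Int) :=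
  let out_en_ids := en.map (fun sent => sent.map (fun word => pvGet1 en_dict word))
  let out_cn_ids := cn.map (fun sent => sent.map (fun word => pvGet1 cn_dict word))
  if sort then
    -- len_argsort(out_en_ids): sorted(range(len(seq)), key=lambda x: len(seq[x]))
    let sorted_index := PySem.List.sorted (PySem.List.pyRange 0 (out_en_ids.length : Int) 1)
      (fun x => ((PySem.List.pyGetD out_en_ids x []).length : Int)) false
    (sorted_index.map (fun idx => PySem.List.pyGetD out_en_ids idx []),
     sorted_index.map (fun idx => PySem.List.pyGetD out_cn_ids idx []))
  else
    (out_en_ids, out_cn_ids)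

-- ===== PORT B =====
def word2id_alt (en : List (List String)) (cn : List (List String)) (en_dict : List (String × Int)) (cn_dict : List (String × Int)) (sort : Bool) : List (List Int) × List (List Int) :=
  let out_en_ids := en.map (fun sent => sent.map (fun word => pvGet1 en_dict word))
  let out_cn_ids := cn.map (fun sent => sent.map (fun word => pvGet1 cn_dict word))
  if sort then
    -- m = max(map(len, out_en_ids), default=-1)
    let m : Int := out_en_ids.foldl (fun acc e => max acc (e.length : Int)) (-1)
    -- buckets = [[] for _ in range(m+1)]; buckets[len(pair[0])].append(pair)
    let buckets : List (List (List Int × List Int)) :=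
      (out_en_ids.zip out_cn_ids).foldl
        (fun b p => b.modify p.1.length (fun l => l ++ [p]))
        (List.replicate (m + 1).toNat [])
    (buckets.flatMap (fun b => b.map (fun p => p.1)),
     buckets.flatMap (fun b => b.map (fun p => p.2)))
  else
    (out_en_ids, out_cn_ids)

-- ===== PRECONDITION & SPEC =====
-- Pre_ excludes sort=True with len(cn) < len(en): there A raises IndexError (out_cn_ids[idx] out of range).
def Pre_word2id (en : List (List String)) (cn : List (List String)) (en_dict : List (String × Int)) (cn_dict : List (String × Int)) (sort : Bool) : Prop :=
  sort = true → en.length ≤ cn.length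
instance (en : List (List String)) (cn : List (List String)) (en_dict : List (String × Int)) (cn_dict : List (String × Int)) (sort : Bool) : Decidable (Pre_word2id en cn en_dict cn_dict sort) := by unfold Pre_word2id; infer_instance
def pvWitness_word2id : List (List String) × List (List String) × (List (String × Int)) × (List (String × Int)) × Bool :=
  ([["a"], ["b", "a"]], [["x"], ["y"]], [("a", 2)], [("y", 7)], true)

def Spec_word2id (en : List (List String)) (cn : List (List String)) (en_dict : List (String × Int)) (cn_dict : List (String × Int)) (sort : Bool) (out : List (List Int) × List (List Int)) : Prop := out = word2id_alt en cn en_dict cn_dict sort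
instance (en : List (List String)) (cn : List (List String)) (en_dict : List (String × Int)) (cn_dict : List (String × Int)) (sort : Bool) (out : List (List Int) × List (List Int)) : Decidable (Spec_word2id en cn en_dict cn_dict sort out) := by unfold Spec_word2id; infer_instance

-- ===== CLAIM (what is proved, stated in full; the proofs are below) =====
def Claim_equal_word2id : Prop := ∀ (en : List (List String)) (cn : List (List String)) (en_dict : List (String × Int)) (cn_dict : List (String × Int)) (sort : Bool), Dom_word2id en cn en_dict cn_dict sort → Pre_word2id en cn en_dict cn_dict sort → Spec_word2id en cn en_dict cn_dict sort (word2id en cn en_dict cn_dict sort)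

-- ===== LEMMAS AND PROOFS =====

-- mapping g commutes with insertBy when the comparison looks only at g of the elements
lemma insertBy_map {α β : Type} (before : β → β → Bool) (g : α → β) (x : α) :
    ∀ ys : List α, PySem.List.insertBy before (g x) (ys.map g) = (PySem.List.insertBy (fun a b => before (g a) (g b)) x ys).map g := by
  intro ys
  induction ys with
  | nil => simp [PySem.List.insertBy]
  | cons y t ih => simp [PySem.List.insertBy]; split_ifs <;> simp_all

-- stable sort of a mapped list = map of the sort under the composed key
lemma sorted_map {α β κ : Type} [LT κ] [DecidableLT κ] (g : α → β) (key : β → κ) (ys : List α) :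
    PySem.List.sorted (ys.map g) key false = (PySem.List.sorted ys (fun a => key (g a)) false).map g := by
  rw [PySem.List.sorted_eq_foldl_insertBy, PySem.List.sorted_eq_foldl_insertBy, List.foldl_map]
  have h : ∀ (l : List α) (acc : List α),
      l.foldl (fun acc x => PySem.List.insertBy (fun a b => decide (key a < key b)) (g x) acc) (acc.map g)
        = (l.foldl (fun acc x => PySem.List.insertBy (fun a b => decide (key (g a) < key (g b))) x acc) acc).map g := by
    intro l
    induction l with
    | nil => intro acc; rfl
    | cons x t ih => intro acc; simp only [List.foldl_cons, insertBy_map, ih]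
  exact h ys []

-- indexing the first len(l1) positions of both lists is zip (when l1 is no longer than l2)
lemma map_index_eq_zip {α β : Type} [Inhabited α] [Inhabited β] (l1 : List α) (l2 : List β) (d1 : α) (d2 : β)
    (h : l1.length ≤ l2.length) :
    (PySem.List.pyRange 0 (l1.length : Int) 1).map
      (fun i => (PySem.List.pyGetD l1 i d1, PySem.List.pyGetD l2 i d2)) = l1.zip l2 := by
  apply List.ext_getElem
  · simp [PySem.List.length_pyRange_one]; omega
  · intro i hi1 hi2
    have hi : i < l1.length := by simpa [PySem.List.length_pyRange_one] using hi1
    simp [PySem.List.getElem_pyRange_one, PySem.List.pyGetD_natCast,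
      List.getD_eq_getElem?_getD, hi, Nat.lt_of_lt_of_le hi h]

-- insertBy skips a prefix it should not go before
lemma insertBy_append_of_not_before {α : Type} (before : α → α → Bool) (x : α) (as bs : List α)
    (h : ∀ y ∈ as, before x y = false) :
    PySem.List.insertBy before x (as ++ bs) = as ++ PySem.List.insertBy before x bs := by
  induction as with
  | nil => rfl
  | cons a t ih =>
    simp only [List.cons_append, PySem.List.insertBy, h a (by simp),
      Bool.false_eq_true, if_false]
    rw [ih (fun y hy => h y (by simp [hy]))]

-- insertBy puts x in front when it goes before everything
lemma insertBy_front {α : Type} (before : α → α → Bool) (x : α) (bs : List α)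
    (h : ∀ y ∈ bs, before x y = true) :
    PySem.List.insertBy before x bs = x :: bs := by
  cases bs with
  | nil => rfl
  | cons b t => simp [PySem.List.insertBy, h b (by simp)]

-- inserting an element of key v into increasing key-buckets appends it to bucket v
lemma insertBy_flatMap {α : Type} (k : α → Nat) (x : α) (v : Nat) (hv : k x = v) :
    ∀ (vs : List Nat) (g : Nat → List α), vs.Pairwise (· < ·) →
      (∀ i ∈ vs, ∀ y ∈ g i, k y = i) → v ∈ vs →
      PySem.List.insertBy (fun a b => decide ((k a : Int) < (k b : Int))) x (vs.flatMap g)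
        = vs.flatMap (fun i => if i = v then g i ++ [x] else g i) := by
  intro vs
  induction vs with
  | nil => intro g _ _ hmem; exact absurd hmem (by simp)
  | cons i rest ih =>
    intro g hpw hkey hmem
    have hrest_gt : ∀ j ∈ rest, i < j := fun j hj => (List.pairwise_cons.1 hpw).1 j hj
    simp only [List.flatMap_cons]
    by_cases hiv : i = v
    · subst hiv
      rw [insertBy_append_of_not_before _ x (g i) _
          (fun y hy => by simp [hkey i (by simp) y hy, hv])]
      rw [insertBy_front _ x _ (fun y hy => by
        obtain ⟨j, hj, hyj⟩ := List.mem_flatMap.1 hy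
        have h1 : k y = j := hkey j (by simp [hj]) y hyj
        have h2 : i < j := hrest_gt j hj
        simp only [hv, h1, decide_eq_true_eq]
        exact_mod_cast h2)]
      rw [if_pos rfl]
      have hrw : rest.flatMap (fun j => if j = i then g j ++ [x] else g j) = rest.flatMap g := by
        refine List.flatMap_congr (fun j hj => ?_)
        have := hrest_gt j hj
        rw [if_neg (by omega)]
      rw [hrw]; simp
    · have hvrest : v ∈ rest := by
        rcases List.mem_cons.1 hmem with h | h
        · exact absurd h.symm hiv
        · exact h
      have hiltv : i < v := hrest_gt v hvrest
      rw [insertBy_append_of_not_before _ x (g i) _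
          (fun y hy => by
            have h1 : k y = i := hkey i (by simp) y hy
            simp only [hv, h1, decide_eq_false_iff_not, not_lt]
            exact_mod_cast Nat.le_of_lt hiltv)]
      rw [ih g (List.pairwise_cons.1 hpw).2 (fun j hj => hkey j (by simp [hj])) hvrest]
      rw [if_neg hiv]

-- stable sort by a Nat-valued key (cast to Int) = concatenation of the key-buckets
lemma sorted_eq_flatMap_filter {α : Type} (k : α → Nat) (n : Nat) :
    ∀ ps : List α, (∀ p ∈ ps, k p < n) →
      PySem.List.sorted ps (fun p => (k p : Int)) false
        = (List.range n).flatMap (fun i => ps.filter (fun p => k p == i)) := by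
  intro ps
  induction ps using List.reverseRecOn with
  | nil => intro _; simp [PySem.List.sorted_eq_foldl_insertBy]
  | append_singleton t x ih =>
    intro h
    rw [PySem.List.sorted_eq_foldl_insertBy, List.foldl_append, List.foldl_cons, List.foldl_nil,
      ← PySem.List.sorted_eq_foldl_insertBy]
    rw [ih (fun p hp => h p (by simp [hp]))]
    rw [insertBy_flatMap k x (k x) rfl (List.range n)
        (fun i => t.filter (fun p => k p == i)) List.pairwise_lt_range
        (fun i _ y hy => by simpa using (List.mem_filter.1 hy).2)
        (List.mem_range.2 (h x (by simp)))]
    refine List.flatMap_congr (fun i _ => ?_)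
    rw [List.filter_append]
    by_cases hxi : k x = i
    · simp [hxi]
    · simp [hxi]
      omega

-- every length is ≤ the running max, and the fold only grows its accumulator
lemma le_foldl_max (l : List Int) : ∀ (b : Int) (x : Int), x ∈ l ∨ x ≤ b →
    x ≤ l.foldl (fun acc e => max acc e) b := by
  induction l with
  | nil =>
    intro b x h
    simp only [List.foldl_nil]
    rcases h with h | h
    · exact absurd h (by simp)
    · exact h
  | cons a t ih =>
    intro b x h
    simp only [List.foldl_cons]
    rcases h with h | h
    · rcases List.mem_cons.1 h with h | h
      · exact ih _ _ (Or.inr (by simp [h]))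
      · exact ih _ _ (Or.inl h)
    · exact ih _ _ (Or.inr (le_trans h (le_max_left _ _)))

-- the bucket fold computes, bucket by bucket, the filter of the input by key
lemma bucket_fold_spec {α : Type} (k : α → Nat) :
    ∀ (ps : List α) (bs : List (List α)),
      ps.foldl (fun b p => b.modify (k p) (fun l => l ++ [p])) bs
        = (List.range bs.length).map (fun i => bs.getD i [] ++ ps.filter (fun p => k p == i)) := by
  intro ps
  induction ps with
  | nil =>
    intro bs
    simp only [List.foldl_nil, List.filter_nil, List.append_nil]
    apply List.ext_getElem
    · simp
    · intro i h1 h2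
      simp only [List.getElem_map, List.getElem_range, List.getD_eq_getElem?_getD]
      rw [List.getElem?_eq_getElem (by simpa using h2)]
      rfl
  | cons p t ih =>
    intro bs
    simp only [List.foldl_cons]
    rw [ih]
    have hlen : (bs.modify (k p) (fun l => l ++ [p])).length = bs.length := by
      simp
    rw [hlen]
    refine List.map_congr_left (fun i hi => ?_)
    have hi' : i < bs.length := List.mem_range.1 hi
    have hget : (bs.modify (k p) (fun l => l ++ [p])).getD i []
        = (if k p = i then bs.getD i [] ++ [p] else bs.getD i []) := by
      simp only [List.getD_eq_getElem?_getD, List.getElem?_modify]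
      rw [List.getElem?_eq_getElem hi']
      by_cases h : k p = i <;> simp [h]
    rw [hget]
    rw [List.filter_cons]
    by_cases h : k p = i
    · simp [h]
    · simp [h]

theorem word2id_spec : Claim_equal_word2id := by
  intro en cn en_dict cn_dict sort _ hpre
  unfold Spec_word2id word2id word2id_alt
  cases sort with
  | false => simp
  | true =>
    have hlen : en.length ≤ cn.length := hpre rfl
    simp only [if_true]
    set oe := en.map (fun sent => sent.map (fun word => pvGet1 en_dict word)) with hoe
    set oc := cn.map (fun sent => sent.map (fun word => pvGet1 cn_dict word)) with hoc
    have hl : oe.length ≤ oc.length := by simp [hoe, hoc, hlen]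
    -- A side: the argsorted index list, reindexing = mapping over sorted pairs
    have hz : (PySem.List.pyRange 0 (oe.length : Int) 1).map
        (fun i => (PySem.List.pyGetD oe i [], PySem.List.pyGetD oc i [])) = oe.zip oc :=
      map_index_eq_zip oe oc [] [] hl
    have hS : PySem.List.sorted (oe.zip oc) (fun p : List Int × List Int => (p.1.length : Int)) false
        = (PySem.List.sorted (PySem.List.pyRange 0 (oe.length : Int) 1)
            (fun x => ((PySem.List.pyGetD oe x []).length : Int)) false).map
            (fun i => (PySem.List.pyGetD oe i [], PySem.List.pyGetD oc i [])) := by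
      rw [← hz, sorted_map]
    -- B side: the max-length bound covers every key
    set m : Int := oe.foldl (fun acc e => max acc (e.length : Int)) (-1) with hm
    have hkey : ∀ p ∈ oe.zip oc, p.1.length < (m + 1).toNat := by
      intro p hp
      obtain ⟨a, b⟩ := p
      have hp1 : a ∈ oe := (List.of_mem_zip hp).1
      have hle : ((a.length : Int)) ≤ m := by
        have h := le_foldl_max (oe.map (fun e : List Int => (e.length : Int))) (-1)
          (a.length : Int) (Or.inl (List.mem_map_of_mem hp1))
        rw [List.foldl_map] at h
        exact h
      simp only
      omega
    have hbucket : (oe.zip oc).foldl (fun b p => b.modify p.1.length (fun l => l ++ [p]))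
        (List.replicate (m + 1).toNat [])
        = (List.range (m + 1).toNat).map
            (fun i => (oe.zip oc).filter (fun p => p.1.length == i)) := by
      rw [bucket_fold_spec (fun p : List Int × List Int => p.1.length)]
      simp only [List.length_replicate]
      refine List.map_congr_left (fun i hi => ?_)
      have : i < (m + 1).toNat := List.mem_range.1 hi
      simp [List.getD_eq_getElem?_getD, this]
    have hsorted : PySem.List.sorted (oe.zip oc)
          (fun p : List Int × List Int => (p.1.length : Int)) false
        = (List.range (m + 1).toNat).flatMap
            (fun i => (oe.zip oc).filter (fun p => p.1.length == i)) :=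
      sorted_eq_flatMap_filter (fun p : List Int × List Int => p.1.length)
        (m + 1).toNat (oe.zip oc) hkey
    rw [hbucket]
    simp only [List.flatMap_map]
    rw [← List.map_flatMap, ← List.map_flatMap]
    rw [← hsorted, hS]
    simp [List.map_map, Function.comp_def]
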